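-- pv_equiv track=rewrite | github.com/Klaudiusz321/Tensor-backend-calculator | myproject/utilis/calcualtion/indexes.py | generate_index_riemann
-- ===== SOURCE A (Python) =====
-- def generate_index_riemann(n):
--     index = []
--     for a in range(n):
--         for b in range(a, n):
--             for c in range(n):
--                 for d in range(c, n):
--                     if (a * n + b) <= (c * n + d):
--                         index.append((a, b, c, d))
--     return index
-- ===== SOURCE B (Python) =====
-- def generate_index_riemann(n):
--     # Precompute the symmetric pairs once (ordered by the linearized key a*n+b),
--     # then take each pair together with every pair at the same or a later position.
--     pairs = [(a, b) for a in range(n) for b in range(a, n)]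
--     out = []
--     for i, (a, b) in enumerate(pairs):
--         for (c, d) in pairs[i:]:
--             out.append((a, b, c, d))
--     return out
-- ===== Notes on version B (the rewrite author's own statement) =====
-- stated objective: simpler
-- what changed: Builds the list of symmetric index pairs once and pairs each with every later-or-equal pair by position, replacing four nested range loops with a modular-key comparison filter by a precomputed pair table and a suffix scan.
import Mathlib
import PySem

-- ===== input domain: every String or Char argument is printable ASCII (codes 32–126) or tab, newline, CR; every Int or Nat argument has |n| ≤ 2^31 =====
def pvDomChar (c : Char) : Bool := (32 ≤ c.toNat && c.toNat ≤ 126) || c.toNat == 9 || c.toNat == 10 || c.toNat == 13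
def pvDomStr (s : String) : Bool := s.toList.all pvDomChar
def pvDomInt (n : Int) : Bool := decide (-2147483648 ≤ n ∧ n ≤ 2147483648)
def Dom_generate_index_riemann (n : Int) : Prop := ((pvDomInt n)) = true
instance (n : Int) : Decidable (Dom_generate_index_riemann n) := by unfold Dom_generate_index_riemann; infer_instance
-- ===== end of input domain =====

-- B builds the symmetric-pair table once and scans suffixes of it, replacing A's four
-- nested loops with a modular-key filter; objective: simpler decomposition, same output.


-- ===== PORT A =====
def generate_index_riemann (n : Int) : List (Int × Int × Int × Int) :=
  (PySem.List.pyRange 0 n).foldl (fun idx a =>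
    (PySem.List.pyRange a n).foldl (fun idx b =>
      (PySem.List.pyRange 0 n).foldl (fun idx c =>
        (PySem.List.pyRange c n).foldl (fun idx d =>
          if a * n + b ≤ c * n + d then idx ++ [(a, b, c, d)] else idx) idx) idx) idx) []

-- ===== PORT B =====
-- pairs = [(a,b) for a in range(n) for b in range(a,n)]
def pvPairs (n : Int) : List (Int × Int) :=
  (PySem.List.pyRange 0 n).flatMap (fun a => (PySem.List.pyRange a n).map (fun b => (a, b)))

-- 'for i,(a,b) in enumerate(pairs): for (c,d) in pairs[i:]': each suffix head paired with the whole suffix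
def pvGo : List (Int × Int) → List (Int × Int × Int × Int)
  | [] => []
  | p :: rest => (p :: rest).map (fun q => (p.1, p.2, q.1, q.2)) ++ pvGo rest

def generate_index_riemann_alt (n : Int) : List (Int × Int × Int × Int) :=
  pvGo (pvPairs n)

-- ===== PRECONDITION & SPEC =====
def Spec_generate_index_riemann (n : Int) (out : List (Int × Int × Int × Int)) : Prop := out = generate_index_riemann_alt n
instance (n : Int) (out : List (Int × Int × Int × Int)) : Decidable (Spec_generate_index_riemann n out) := by unfold Spec_generate_index_riemann; infer_instance

-- ===== CLAIM (what is proved, stated in full; the proofs are below) =====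
def Claim_equal_generate_index_riemann : Prop := ∀ (n : Int), Dom_generate_index_riemann n → Spec_generate_index_riemann n (generate_index_riemann n)

-- ===== LEMMAS AND PROOFS =====

-- the linearized key a*n+b that A compares
def pvKey (n : Int) (p : Int × Int) : Int := p.1 * n + p.2

-- A, with its append-folds rewritten, is the filter form over the pair table
lemma pvA_filter_form (n : Int) :
    generate_index_riemann n =
      (pvPairs n).flatMap (fun p =>
        ((pvPairs n).filter (fun q => decide (pvKey n p ≤ pvKey n q))).map
          (fun q => (p.1, p.2, q.1, q.2))) := by
  simp only [generate_index_riemann, PySem.List.foldl_append_ite, PySem.List.foldl_append_eq_flatMap,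
    List.nil_append, pvPairs, pvKey, List.flatMap_assoc, List.flatMap_map, List.filter_flatMap,
    List.filter_map, List.map_flatMap, List.map_map, Function.comp_def]
  rfl

-- the pair table is strictly increasing in the key
lemma pvPairs_sorted_aux (n : Int) (L : List Int) (hL : List.Pairwise (· < ·) L)
    (hpos : ∀ a ∈ L, 0 ≤ a) (hlt : ∀ a ∈ L, a < n) :
    List.Pairwise (fun p q => pvKey n p < pvKey n q)
      (L.flatMap (fun a => (PySem.List.pyRange a n).map (fun b => (a, b)))) := by
  induction L with
  | nil => simp
  | cons a L ih =>
    rw [List.flatMap_cons, List.pairwise_append]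
    obtain ⟨hcross, htail⟩ := List.pairwise_cons.mp hL
    have ha0 : 0 ≤ a := hpos a (List.mem_cons_self ..)
    have han : a < n := hlt a (List.mem_cons_self ..)
    refine ⟨?_, ih htail (fun x hx => hpos x (List.mem_cons_of_mem _ hx))
      (fun x hx => hlt x (List.mem_cons_of_mem _ hx)), ?_⟩
    · rw [List.pairwise_map]
      refine (PySem.List.pairwise_lt_pyRange_one a n).imp ?_
      intro b b' hbb
      simp only [pvKey]
      omega
    · intro p hp q hq
      simp only [List.mem_map, PySem.List.mem_pyRange_one] at hp
      simp only [List.mem_flatMap, List.mem_map, PySem.List.mem_pyRange_one] at hq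
      obtain ⟨b, hb, rfl⟩ := hp
      obtain ⟨a', ha', b', hb', rfl⟩ := hq
      have haa' : a < a' := hcross a' ha'
      have h1 : (a + 1) * n ≤ a' * n :=
        mul_le_mul_of_nonneg_right (by omega) (by omega)
      simp only [pvKey]
      nlinarith [hb.2, hb'.1]

lemma pvPairs_sorted (n : Int) :
    List.Pairwise (fun p q => pvKey n p < pvKey n q) (pvPairs n) := by
  refine pvPairs_sorted_aux n _ (PySem.List.pairwise_lt_pyRange_one 0 n) ?_ ?_ <;>
    intro a ha <;> rw [PySem.List.mem_pyRange_one] at ha <;> omega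

-- on a strictly key-sorted list, the filter form IS the suffix scan pvGo
lemma pvFilter_eq_go (n : Int) (l : List (Int × Int))
    (h : List.Pairwise (fun p q => pvKey n p < pvKey n q) l) :
    l.flatMap (fun p =>
        (l.filter (fun q => decide (pvKey n p ≤ pvKey n q))).map
          (fun q => (p.1, p.2, q.1, q.2))) = pvGo l := by
  induction l with
  | nil => simp [pvGo]
  | cons p t ih =>
    obtain ⟨hlt, ht⟩ := List.pairwise_cons.mp h
    rw [List.flatMap_cons, pvGo]
    congr 1
    · have hfilt : (p :: t).filter (fun q => decide (pvKey n p ≤ pvKey n q)) = p :: t := by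
        refine List.filter_eq_self.mpr ?_
        intro q hq
        rcases List.mem_cons.mp hq with rfl | hq
        · simp
        · simpa using le_of_lt (hlt q hq)
      rw [hfilt]
    · rw [← ih ht]
      refine List.flatMap_congr ?_
      intro p' hp'
      have : (p :: t).filter (fun q => decide (pvKey n p' ≤ pvKey n q))
           = t.filter (fun q => decide (pvKey n p' ≤ pvKey n q)) := by
        rw [List.filter_cons_of_neg (by simpa using not_le.mpr (hlt p' hp'))]
      rw [this]

-- ===== VERDICT (by name: the statement is the Claim_ definition above) =====
theorem generate_index_riemann_spec : Claim_equal_generate_index_riemann := by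
  intro n _
  show generate_index_riemann n = generate_index_riemann_alt n
  rw [pvA_filter_form, generate_index_riemann_alt, pvFilter_eq_go n _ (pvPairs_sorted n)]
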